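-- pv_equiv track=rewrite | github.com/Raahim2/Online-Desktop | Bots/binbot.py | extract_idea_summary
-- ===== SOURCE A (Python) =====
-- def extract_idea_summary(full_idea_text):
--     """Extracts a concise summary (e.g., first line) from the generated idea."""
--     if not full_idea_text:
--         return "Unknown Project Idea"
--     lines = full_idea_text.strip().split('\n')
--     # Try to find a line starting with "Project Name:" or similar, otherwise take the first non-empty line
--     for line in lines:
--         if line.strip().lower().startswith("project name:"):
--             return line.strip() # Return the whole line
--     # Fallback to the first non-empty line
--     for line in lines:
--         if line.strip():
--             return line.strip()
--     return "Unnamed Project Idea" # Fallback if all lines are empty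
-- ===== SOURCE B (Python) =====
-- def extract_idea_summary(full_idea_text):
--     """Extracts a concise summary (e.g., first line) from the generated idea."""
--     if not full_idea_text:
--         return "Unknown Project Idea"
--     first_nonempty = None
--     for line in full_idea_text.strip().split('\n'):
--         stripped = line.strip()
--         if stripped.lower().startswith("project name:"):
--             return stripped
--         if first_nonempty is None and stripped:
--             first_nonempty = stripped
--     return first_nonempty if first_nonempty is not None else "Unnamed Project Idea"
-- ===== Notes on version B (the rewrite author's own statement) =====
-- stated objective: alternative
-- what changed: Replaces A's two sequential scans over the lines with a single pass that short-circuits on a project-name header line while remembering the first non-empty stripped line as the fallback.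
import Mathlib
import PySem

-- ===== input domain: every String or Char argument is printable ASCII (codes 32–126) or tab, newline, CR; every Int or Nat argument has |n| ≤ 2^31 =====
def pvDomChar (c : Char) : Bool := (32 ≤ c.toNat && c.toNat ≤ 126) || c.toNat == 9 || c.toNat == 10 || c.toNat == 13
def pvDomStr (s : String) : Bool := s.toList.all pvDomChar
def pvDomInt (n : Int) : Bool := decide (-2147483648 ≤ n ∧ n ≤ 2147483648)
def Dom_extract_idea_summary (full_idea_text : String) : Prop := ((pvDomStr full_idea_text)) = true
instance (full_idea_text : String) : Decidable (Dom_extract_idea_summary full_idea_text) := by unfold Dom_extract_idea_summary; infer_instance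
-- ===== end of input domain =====

-- B replaces A's two sequential scans over the lines by one pass that short-circuits on a
-- "project name:" line while remembering the first non-empty stripped line as fallback.

-- ===== PORT A =====
-- A's first loop: first line whose stripped lowercase starts with "project name:"
def pvFindName : List String → Option String
  | [] => none
  | l :: rest =>
    if PySem.Str.startswith (PySem.Str.lower (PySem.Str.strip l)) "project name:" then
      some (PySem.Str.strip l)
    else pvFindName rest

-- A's second loop: first line whose stripped form is non-empty (Python truthiness)
def pvFindNonempty : List String → Option String
  | [] => none
  | l :: rest =>
    if (PySem.Str.strip l).toList.isEmpty then pvFindNonempty rest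
    else some (PySem.Str.strip l)

def extract_idea_summary (full_idea_text : String) : String :=
  if full_idea_text.toList.isEmpty then "Unknown Project Idea"
  else
    let lines := (PySem.Str.split? (PySem.Str.strip full_idea_text) "\n").getD []
    match pvFindName lines with
    | some l => l
    | none =>
      match pvFindNonempty lines with
      | some l => l
      | none => "Unnamed Project Idea"

-- ===== PORT B =====
-- B's single loop, carrying first_nonempty : Option String
def pvScanB : List String → Option String → String
  | [], acc => acc.getD "Unnamed Project Idea"
  | l :: rest, acc =>
    let stripped := PySem.Str.strip l
    if PySem.Str.startswith (PySem.Str.lower stripped) "project name:" then stripped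
    else
      pvScanB rest (if acc.isNone && !stripped.toList.isEmpty then some stripped else acc)

def extract_idea_summary_alt (full_idea_text : String) : String :=
  if full_idea_text.toList.isEmpty then "Unknown Project Idea"
  else
    pvScanB ((PySem.Str.split? (PySem.Str.strip full_idea_text) "\n").getD []) none

-- ===== PRECONDITION & SPEC =====
def Spec_extract_idea_summary (full_idea_text : String) (out : String) : Prop := out = extract_idea_summary_alt full_idea_text
instance (full_idea_text : String) (out : String) : Decidable (Spec_extract_idea_summary full_idea_text out) := by unfold Spec_extract_idea_summary; infer_instance

-- ===== CLAIM (what is proved, stated in full; the proofs are below) =====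
def Claim_equal_extract_idea_summary : Prop := ∀ (full_idea_text : String), Dom_extract_idea_summary full_idea_text → Spec_extract_idea_summary full_idea_text (extract_idea_summary full_idea_text)

-- ===== LEMMAS AND PROOFS =====
lemma pvScanB_eq (lines : List String) (acc : Option String) :
    pvScanB lines acc =
      match pvFindName lines with
      | some l => l
      | none =>
        match acc with
        | some v => v
        | none =>
          match pvFindNonempty lines with
          | some l => l
          | none => "Unnamed Project Idea" := by
  induction lines generalizing acc with
  | nil => cases acc <;> simp [pvScanB, pvFindName, pvFindNonempty, Option.getD]
  | cons l rest ih =>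
    simp only [pvScanB, pvFindName, pvFindNonempty]
    by_cases hname : PySem.Str.startswith (PySem.Str.lower (PySem.Str.strip l)) "project name:" = true
    · rw [if_pos hname, if_pos hname]
    · rw [if_neg hname, if_neg hname]
      cases acc with
      | some v => simp [ih]
      | none =>
        by_cases hemp : (PySem.Str.strip l).toList.isEmpty = true
        · rw [List.isEmpty_iff, PySem.Str.toList_strip] at hemp
          simp only [Option.isNone_none, Bool.true_and]
          simp [ih, hemp]
        · rw [List.isEmpty_iff, PySem.Str.toList_strip] at hemp
          simp only [Option.isNone_none, Bool.true_and]
          simp [ih, hemp]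

theorem extract_idea_summary_spec : Claim_equal_extract_idea_summary := by
  intro s _
  unfold Spec_extract_idea_summary extract_idea_summary extract_idea_summary_alt
  by_cases h : s.toList.isEmpty = true
  · simp [h]
  · simp only [h, if_neg, Bool.not_eq_true]
    rw [pvScanB_eq]
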